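-- pv_equiv track=rewrite | github.com/James-HoneyBadger/Time_Warp_Studio | Platforms/Python/time_warp/languages/logo.py | _handle_prefix_mult
-- ===== SOURCE A (Python) =====
-- def _handle_prefix_mult(expr: str) -> str:
--     """
--     Handle (* A B C) -> (A * B * C)
--     Iterative implementation to avoid regex recursion limits.
--     """
--     result = []
--     i = 0
--     n = len(expr)
--     while i < n:
--         if expr[i] == "(":
--             # Check for (*
--             j = i + 1
--             while j < n and expr[j].isspace():
--                 j += 1
--
--             if j < n and expr[j] == "*":
--                 # Found (*
--                 # Check if there are nested parens before the closing )
--                 k = j + 1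
--                 # Skip whitespace after *
--                 while k < n and expr[k].isspace():
--                     k += 1
--
--                 # Scan for )
--                 content_start = k
--                 has_nested = False
--                 while k < n:
--                     if expr[k] == "(":
--                         has_nested = True
--                         break
--                     if expr[k] == ")":
--                         break
--                     k += 1
--
--                 if k < n and expr[k] == ")" and not has_nested:
--                     # Found simple (* ... )
--                     content = expr[content_start:k]
--                     parts = content.split()
--                     new_content = " * ".join(parts)
--                     result.append(f"({new_content})")
--                     i = k + 1
--                     continue
--
--         result.append(expr[i])
--         i += 1
--     return "".join(result)
-- ===== SOURCE B (Python) =====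
-- def _handle_prefix_mult(expr: str) -> str:
--     """Rewrite simple (* A B C) groups to (A * B * C) by jumping between
--     parentheses with str.find instead of scanning char by char."""
--     out = []
--     rest = expr
--     while True:
--         p = rest.find("(")
--         if p == -1:
--             out.append(rest)
--             return "".join(out)
--         head, rest = rest[:p], rest[p + 1:]
--         qc = rest.find(")")
--         if qc != -1 and "(" not in rest[:qc]:
--             seg = rest[:qc].lstrip()
--             if seg.startswith("*"):
--                 out.append(head + "(" + " * ".join(seg[1:].split()) + ")")
--                 rest = rest[qc + 1:]
--                 continue
--         out.append(head + "(")
-- ===== Notes on version B (the rewrite author's own statement) =====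
-- stated objective: faster
-- what changed: Replaced the character-by-character index scanner (with inner whitespace-skip and paren-scan loops) by a loop that jumps directly between parentheses with str.find, classifies the candidate group using slicing/lstrip/startswith, and rewrites it with ' * '.join(seg[1:].split()), copying whole chunks at once.
import Mathlib
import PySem

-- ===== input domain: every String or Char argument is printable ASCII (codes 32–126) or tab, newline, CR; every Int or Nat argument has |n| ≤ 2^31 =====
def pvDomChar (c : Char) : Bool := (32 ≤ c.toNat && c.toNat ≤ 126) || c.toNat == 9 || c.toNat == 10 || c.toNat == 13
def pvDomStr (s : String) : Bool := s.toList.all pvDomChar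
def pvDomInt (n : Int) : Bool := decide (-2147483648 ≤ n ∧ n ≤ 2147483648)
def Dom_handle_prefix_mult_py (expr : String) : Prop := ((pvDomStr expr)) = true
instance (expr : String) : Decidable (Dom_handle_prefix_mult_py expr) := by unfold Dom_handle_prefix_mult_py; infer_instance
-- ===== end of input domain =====

-- ===== PORT A =====
-- while j < n and expr[j].isspace(): j += 1
def pvA_skip (s : List Char) (j : Nat) : Nat :=
  if h : j < s.length then
    if PySem.Chars.isspace s[j] then pvA_skip s (j+1) else j
  else j
termination_by s.length - j

theorem pvA_skip_ge (s : List Char) (j : Nat) : j ≤ pvA_skip s j := by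
  fun_induction pvA_skip s j <;> omega

-- scan for ')' / nested '(' : returns (k, has_nested)
def pvA_scan (s : List Char) (k : Nat) : Nat × Bool :=
  if h : k < s.length then
    if s[k] = '(' then (k, true)
    else if s[k] = ')' then (k, false)
    else pvA_scan s (k+1)
  else (k, false)
termination_by s.length - k

theorem pvA_scan_ge (s : List Char) (k : Nat) : k ≤ (pvA_scan s k).1 := by
  fun_induction pvA_scan s k <;> simp_all <;> omega

def pvA_loop (s : List Char) (i : Nat) (acc : List (List Char)) : List (List Char) :=
  if h : i < s.length then
    if s[i] = '(' then
      let j := pvA_skip s (i+1)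
      if hj : j < s.length then
        if s[j] = '*' then
          let k0 := pvA_skip s (j+1)
          let p := pvA_scan s k0
          if hk : p.1 < s.length then
            if s[p.1] = ')' ∧ p.2 = false then
              let content := PySem.List.slice s (some (k0:Int)) (some (p.1:Int))
              pvA_loop s (p.1+1)
                (acc ++ [('(' :: PySem.Chars.join " * ".toList (PySem.Chars.split₀ content)) ++ [')']])
            else pvA_loop s (i+1) (acc ++ [[s[i]]])
          else pvA_loop s (i+1) (acc ++ [[s[i]]])
        else pvA_loop s (i+1) (acc ++ [[s[i]]])
      else pvA_loop s (i+1) (acc ++ [[s[i]]])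
    else pvA_loop s (i+1) (acc ++ [[s[i]]])
  else acc
termination_by s.length - i
decreasing_by
  · have h1 := pvA_skip_ge s (i+1)
    have h2 := pvA_skip_ge s (pvA_skip s (i+1) + 1)
    have h3 := pvA_scan_ge s (pvA_skip s (pvA_skip s (i+1) + 1))
    omega
  all_goals omega

def handle_prefix_mult_py (expr : String) : String :=
  String.ofList (PySem.Chars.join "".toList (pvA_loop expr.toList 0 []))

-- ===== PORT B =====
theorem pvB_rest_ne_nil {rest : List Char} (h : PySem.Chars.find rest ['('] ≠ -1) : rest ≠ [] := by
  rw [PySem.Chars.find_ne_neg_one_iff] at h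
  intro he; subst he; simp at h

def pvB_loop (rest : List Char) (out : List (List Char)) : List (List Char) :=
  let p := PySem.Chars.find rest ['(']
  if hp : p = -1 then out ++ [rest]
  else
    let head := PySem.List.slice rest none (some p)
    let rest1 := PySem.List.slice rest (some (p+1)) none
    let qc := PySem.Chars.find rest1 [')']
    if qc ≠ -1 ∧ PySem.Chars.isIn ['('] (PySem.List.slice rest1 none (some qc)) = false then
      let seg := PySem.Chars.lstrip (PySem.List.slice rest1 none (some qc))
      if PySem.Chars.startswith seg ['*'] then
        pvB_loop (PySem.List.slice rest1 (some (qc+1)) none)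
          (out ++ [head ++ ('(' :: PySem.Chars.join " * ".toList (PySem.Chars.split₀ (PySem.List.slice seg (some 1) none)) ++ [')'])])
      else pvB_loop rest1 (out ++ [head ++ ['(']])
    else pvB_loop rest1 (out ++ [head ++ ['(']])
termination_by rest.length
decreasing_by
  · have hge := PySem.Chars.neg_one_le_find rest ['(']
    have hne := pvB_rest_ne_nil hp
    have hlen : 0 < rest.length := List.length_pos_iff.mpr hne
    have hq := PySem.Chars.neg_one_le_find (PySem.List.slice rest (some (PySem.Chars.find rest ['('] + 1)) none) [')']
    rw [PySem.List.slice_from _ (by omega : (0:Int) ≤ PySem.Chars.find (PySem.List.slice rest (some (PySem.Chars.find rest ['('] + 1)) none) [')'] + 1),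
        PySem.List.slice_from rest (by omega : (0:Int) ≤ PySem.Chars.find rest ['('] + 1)]
    simp only [List.length_drop]
    omega
  all_goals
  · have hge := PySem.Chars.neg_one_le_find rest ['(']
    have hne := pvB_rest_ne_nil hp
    have hlen : 0 < rest.length := List.length_pos_iff.mpr hne
    rw [PySem.List.slice_from rest (by omega : (0:Int) ≤ PySem.Chars.find rest ['('] + 1)]
    simp only [List.length_drop]
    omega

def handle_prefix_mult_py_alt (expr : String) : String :=
  String.ofList (PySem.Chars.join "".toList (pvB_loop expr.toList []))

-- ===== PRECONDITION & SPEC =====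
def Spec_handle_prefix_mult_py (expr : String) (out : String) : Prop := out = handle_prefix_mult_py_alt expr
instance (expr : String) (out : String) : Decidable (Spec_handle_prefix_mult_py expr out) := by unfold Spec_handle_prefix_mult_py; infer_instance

-- ===== CLAIM (what is proved, stated in full; the proofs are below) =====
def Claim_equal_handle_prefix_mult_py : Prop := ∀ (expr : String), Dom_handle_prefix_mult_py expr → Spec_handle_prefix_mult_py expr (handle_prefix_mult_py expr)

-- ===== LEMMAS AND PROOFS =====

-- ================= proof-side helpers =================
def pvWs (c : Char) : Bool := PySem.Chars.isspace c
def pvNp (c : Char) : Bool := !(c == '(' || c == ')')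

theorem pvWs_np {c : Char} (h : pvWs c = true) : pvNp c = true := by
  unfold pvNp
  by_contra hn
  simp only [Bool.not_eq_true, Bool.not_eq_false', Bool.or_eq_true, beq_iff_eq] at hn
  rcases hn with h1 | h1 <;> (subst h1; simp [pvWs, PySem.Chars.isspace] at h)

theorem pvWs_ne_lpar {c : Char} (h : pvWs c = true) : c ≠ '(' := by
  intro he; subst he; simp [pvWs, PySem.Chars.isspace] at h
theorem pvWs_ne_rpar {c : Char} (h : pvWs c = true) : c ≠ ')' := by
  intro he; subst he; simp [pvWs, PySem.Chars.isspace] at h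

-- generic list lemmas
theorem pv_dropWhile_eq_drop {α} (p : α → Bool) (l : List α) :
    l.dropWhile p = l.drop (l.takeWhile p).length := by
  induction l with
  | nil => simp
  | cons a t ih =>
    by_cases h : p a
    · simp [List.dropWhile_cons, List.takeWhile_cons, h, ih]
    · simp [List.dropWhile_cons, List.takeWhile_cons, h]

theorem pv_take_takeWhile {α} (p : α → Bool) (l : List α) :
    l.take (l.takeWhile p).length = l.takeWhile p :=
  (List.prefix_iff_eq_take.mp (List.takeWhile_prefix p)).symm

theorem pv_head?_dropWhile_ne {c : Char} {l : List Char} (h : c ∈ l) :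
    (l.dropWhile (fun x => x != c)).head? = some c := by
  induction l with
  | nil => simp at h
  | cons a t ih =>
    by_cases ha : a = c
    · subst ha; simp [List.dropWhile_cons]
    · have hct : c ∈ t := by
        rcases List.mem_cons.mp h with h' | h'
        · exact absurd h'.symm ha
        · exact h'
      simp [ha, ih hct]

theorem pv_prefix_singleton {c : Char} {x : List Char} : [c] <+: x ↔ x.head? = some c := by
  cases x with
  | nil => simp
  | cons a t =>
    constructor
    · intro h
      obtain ⟨u, hu⟩ := h
      simp only [List.cons_append, List.nil_append, List.cons.injEq] at hu
      simp [hu.1]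
    · intro h
      simp only [List.head?_cons, Option.some.injEq] at h
      subst h
      exact ⟨t, rfl⟩

theorem pv_infix_singleton {c : Char} {l : List Char} : [c] <:+: l ↔ c ∈ l := by
  constructor
  · intro h; exact h.subset (by simp)
  · intro h
    rcases List.append_of_mem h with ⟨s, t, rfl⟩
    exact ⟨s, t, by simp⟩

theorem pv_takeWhile_ne_lt {c : Char} : ∀ (l : List Char) (i : Nat),
    i < (l.takeWhile (fun x => x != c)).length → l[i]? ≠ some c := by
  intro l
  induction l with
  | nil => simp
  | cons a t ih =>
    intro i hi
    by_cases ha : a = c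
    · subst ha
      rw [List.takeWhile_cons_of_neg (by simp)] at hi
      simp at hi
    · rw [List.takeWhile_cons_of_pos (p := fun x => x != c) (by simp [ha])] at hi
      cases i with
      | zero => simpa using ha
      | succ n =>
        rw [List.length_cons] at hi
        simpa using ih n (by omega)

theorem pv_find_singleton {c : Char} {l : List Char} (h : c ∈ l) :
    PySem.Chars.find l [c] = (((l.takeWhile (fun x => x != c)).length : Nat) : Int) := by
  have hnn : 0 ≤ PySem.Chars.find l [c] :=
    (PySem.Chars.find_nonneg_iff l [c]).mpr (pv_infix_singleton.mpr h)
  obtain ⟨hpre, hmin⟩ := PySem.Chars.find_spec hnn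
  set F := (PySem.Chars.find l [c]).toNat with hF
  set T := (l.takeWhile (fun x => x != c)).length with hT
  have hTc : l[T]? = some c := by
    rw [← List.head?_drop, ← pv_dropWhile_eq_drop]; exact pv_head?_dropWhile_ne h
  have hFc : l[F]? = some c := by
    rw [← List.head?_drop]; exact pv_prefix_singleton.mp hpre
  have h1 : ¬ (T < F) := by
    intro hlt
    exact (hmin T hlt) (pv_prefix_singleton.mpr (by rw [List.head?_drop]; exact hTc))
  have h2 : ¬ (F < T) := by
    intro hlt
    exact pv_takeWhile_ne_lt l F hlt hFc
  have : F = T := by omega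
  omega

theorem pv_find_singleton_neg {c : Char} {l : List Char} (h : c ∉ l) :
    PySem.Chars.find l [c] = -1 := by
  rw [PySem.Chars.find_eq_neg_one_iff]
  rw [pv_infix_singleton]; exact h

theorem pv_join_nil_flatten (parts : List (List Char)) :
    PySem.Chars.join [] parts = parts.flatten := by
  induction parts with
  | nil => simp [PySem.Chars.join_nil]
  | cons a t ih =>
    cases t with
    | nil => simp [PySem.Chars.join_singleton]
    | cons b u => rw [PySem.Chars.join_cons_cons, List.flatten_cons, ← ih]; simp

theorem pv_dropWhile_dropWhile {p q : Char → Bool} (hpq : ∀ c, p c = true → q c = true)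
    (l : List Char) : (l.dropWhile p).dropWhile q = l.dropWhile q := by
  induction l with
  | nil => simp
  | cons a t ih =>
    by_cases h : p a
    · simp [List.dropWhile_cons, h, hpq a h, ih]
    · simp [List.dropWhile_cons, h]

theorem pv_takeWhile_append_all {p : Char → Bool} {w : List Char} (x : List Char)
    (h : ∀ a ∈ w, p a = true) : (w ++ x).takeWhile p = w ++ x.takeWhile p := by
  induction w with
  | nil => simp
  | cons a t ih =>
    rw [List.cons_append, List.takeWhile_cons_of_pos (h a (by simp))]
    rw [ih (fun b hb => h b (by simp [hb]))]
    simp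

theorem pv_split₀_ws_cons {c : Char} (t : List Char) (h : pvWs c = true) :
    PySem.Chars.split₀ (c :: t) = PySem.Chars.split₀ t := by
  simp [PySem.Chars.split₀, PySem.Chars.split₀.go, pvWs] at h ⊢
  simp [h]

theorem pv_split₀_ws_append {w : List Char} (t : List Char) (h : ∀ a ∈ w, pvWs a = true) :
    PySem.Chars.split₀ (w ++ t) = PySem.Chars.split₀ t := by
  induction w with
  | nil => simp
  | cons a u ih =>
    rw [List.cons_append, pv_split₀_ws_cons _ (h a (by simp)), ih (fun b hb => h b (by simp [hb]))]

-- characterizations of A's helpers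
theorem pvA_skip_drop (s : List Char) (j : Nat) :
    pvA_skip s j = j + ((s.drop j).takeWhile pvWs).length := by
  fun_induction pvA_skip s j with
  | case1 j h hs ih =>
    rw [ih, List.drop_eq_getElem_cons h, List.takeWhile_cons_of_pos (by simpa [pvWs] using hs)]
    simp; omega
  | case2 j h hs =>
    rw [List.drop_eq_getElem_cons h, List.takeWhile_cons_of_neg (by simpa [pvWs] using hs)]
    simp
  | case3 j h =>
    rw [List.drop_eq_nil_of_le (by omega)]
    simp

theorem pvA_skip_dropList (s : List Char) (j : Nat) :
    s.drop (pvA_skip s j) = (s.drop j).dropWhile pvWs := by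
  rw [pvA_skip_drop, pv_dropWhile_eq_drop, ← List.drop_drop]

theorem pvA_scan_spec (s : List Char) (k : Nat) :
    pvA_scan s k = (k + ((s.drop k).takeWhile pvNp).length,
                    decide (((s.drop k).dropWhile pvNp).head? = some '(')) := by
  fun_induction pvA_scan s k with
  | case1 k h hc =>
    rw [List.drop_eq_getElem_cons h,
        List.takeWhile_cons_of_neg (by simp [pvNp, hc]),
        List.dropWhile_cons_of_neg (by simp [pvNp, hc])]
    simp [hc]
  | case2 k h hc1 hc2 =>
    rw [List.drop_eq_getElem_cons h,
        List.takeWhile_cons_of_neg (by simp [pvNp, hc2]),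
        List.dropWhile_cons_of_neg (by simp [pvNp, hc2])]
    simp [hc2, hc1]
  | case3 k h hc1 hc2 ih =>
    rw [ih, List.drop_eq_getElem_cons h,
        List.takeWhile_cons_of_pos (by simp [pvNp, hc1, hc2]),
        List.dropWhile_cons_of_pos (by simp [pvNp, hc1, hc2])]
    simp; omega
  | case4 k h =>
    rw [List.drop_eq_nil_of_le (by omega)]
    simp

-- structural mirror of A (recursion on the suffix)
def pvAS (r : List Char) (acc : List (List Char)) : List (List Char) :=
  match r with
  | [] => acc
  | c :: l =>
    if c = '(' then
      if (l.dropWhile pvWs).head? = some '*' then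
        if (((l.dropWhile pvWs).tail.dropWhile pvWs).dropWhile pvNp).head? = some ')' then
          pvAS ((((l.dropWhile pvWs).tail.dropWhile pvWs).dropWhile pvNp).tail)
            (acc ++ [('(' :: PySem.Chars.join " * ".toList
               (PySem.Chars.split₀ (((l.dropWhile pvWs).tail.dropWhile pvWs).takeWhile pvNp))) ++ [')']])
        else pvAS l (acc ++ [[c]])
      else pvAS l (acc ++ [[c]])
    else pvAS l (acc ++ [[c]])
termination_by r.length
decreasing_by
  · have h1 := List.length_dropWhile_le pvNp ((l.dropWhile pvWs).tail.dropWhile pvWs)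
    have h2 := List.length_dropWhile_le pvWs (l.dropWhile pvWs).tail
    have h3 := List.length_dropWhile_le pvWs l
    have h4 : (l.dropWhile pvWs).tail.length = (l.dropWhile pvWs).length - 1 := List.length_tail
    have h5 : ((((l.dropWhile pvWs).tail.dropWhile pvWs).dropWhile pvNp)).tail.length
        = ((((l.dropWhile pvWs).tail.dropWhile pvWs).dropWhile pvNp)).length - 1 := List.length_tail
    simp only [List.length_cons]
    omega
  all_goals simp only [List.length_cons]; omega

theorem pvBS_mem_ne_nil {r : List Char} (h : '(' ∈ r) : r.dropWhile (fun x => x != '(') ≠ [] := by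
  have := pv_head?_dropWhile_ne h
  intro he; rw [he] at this; simp at this

-- structural mirror of B (recursion on the suffix)
def pvBS (r : List Char) (out : List (List Char)) : List (List Char) :=
  if hp : '(' ∈ r then
    if (')' ∈ ((r.dropWhile (fun x => x != '(')).tail) ∧
        '(' ∉ ((r.dropWhile (fun x => x != '(')).tail.takeWhile (fun x => x != ')'))) ∧
       (((r.dropWhile (fun x => x != '(')).tail.takeWhile (fun x => x != ')')).dropWhile pvWs).head? = some '*' then
      pvBS (((r.dropWhile (fun x => x != '(')).tail.dropWhile (fun x => x != ')')).tail)
        (out ++ [(r.takeWhile (fun x => x != '(')) ++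
          ('(' :: PySem.Chars.join " * ".toList
            (PySem.Chars.split₀ ((((r.dropWhile (fun x => x != '(')).tail.takeWhile (fun x => x != ')')).dropWhile pvWs).tail)) ++ [')'])])
    else pvBS ((r.dropWhile (fun x => x != '(')).tail) (out ++ [(r.takeWhile (fun x => x != '(')) ++ ['(']])
  else out ++ [r]
termination_by r.length
decreasing_by
  · have h0 : 0 < (r.dropWhile (fun x => x != '(')).length :=
      List.length_pos_iff.mpr (pvBS_mem_ne_nil hp)
    have h1 := List.length_dropWhile_le (fun x => x != '(') r
    have h2 : (r.dropWhile (fun x => x != '(')).tail.length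
        = (r.dropWhile (fun x => x != '(')).length - 1 := List.length_tail
    have h3 := List.length_dropWhile_le (fun x => x != ')') (r.dropWhile (fun x => x != '(')).tail
    have h4 : ((r.dropWhile (fun x => x != '(')).tail.dropWhile (fun x => x != ')')).tail.length
        = ((r.dropWhile (fun x => x != '(')).tail.dropWhile (fun x => x != ')')).length - 1 := List.length_tail
    have h5 : (r.dropWhile (fun x => x != '(')).tail.length = (r.dropWhile (fun x => x != '(')).length - 1 := List.length_tail
    omega
  · have h0 : 0 < (r.dropWhile (fun x => x != '(')).length :=
      List.length_pos_iff.mpr (pvBS_mem_ne_nil hp)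
    have h1 := List.length_dropWhile_le (fun x => x != '(') r
    have h5 : (r.dropWhile (fun x => x != '(')).tail.length = (r.dropWhile (fun x => x != '(')).length - 1 := List.length_tail
    omega

-- ===== A's index loop equals the structural mirror pvAS =====
theorem pvA_eq : ∀ (nn : Nat) (s : List Char) (i : Nat) (acc : List (List Char)),
    s.length - i ≤ nn → pvA_loop s i acc = pvAS (s.drop i) acc := by
  intro nn
  induction nn with
  | zero =>
    intro s i acc hle
    rw [pvA_loop]
    rw [dif_neg (by omega)]
    rw [List.drop_eq_nil_of_le (by omega)]
    simp [pvAS]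
  | succ nn ih =>
    intro s i acc hle
    by_cases h : i < s.length
    · rw [pvA_loop]
      dsimp only
      rw [dif_pos h, List.drop_eq_getElem_cons h]
      simp only [pvAS]
      by_cases hpar : s[i] = '('
      · rw [if_pos hpar, if_pos hpar]
        have hj1 : s.drop (pvA_skip s (i+1)) = (s.drop (i+1)).dropWhile pvWs :=
          pvA_skip_dropList s (i+1)
        have hjge := pvA_skip_ge s (i+1)
        by_cases hj : pvA_skip s (i+1) < s.length
        · by_cases hstar : s[pvA_skip s (i+1)] = '*'
          · have hcond1 : ((s.drop (i+1)).dropWhile pvWs).head? = some '*' := by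
              rw [← hj1, List.head?_drop, List.getElem?_eq_getElem hj, hstar]
            rw [dif_pos hj, if_pos hstar, if_pos hcond1]
            have htail : ((s.drop (i+1)).dropWhile pvWs).tail = s.drop (pvA_skip s (i+1) + 1) := by
              rw [← hj1, List.tail_drop]
            have hk1 : s.drop (pvA_skip s (pvA_skip s (i+1) + 1))
                = (((s.drop (i+1)).dropWhile pvWs).tail).dropWhile pvWs := by
              rw [htail, pvA_skip_dropList]
            have hk0ge := pvA_skip_ge s (pvA_skip s (i+1) + 1)
            have hscan := pvA_scan_spec s (pvA_skip s (pvA_skip s (i+1) + 1))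
            have hscange := pvA_scan_ge s (pvA_skip s (pvA_skip s (i+1) + 1))
            have hdropk : s.drop ((pvA_scan s (pvA_skip s (pvA_skip s (i+1) + 1))).1)
                = ((((s.drop (i+1)).dropWhile pvWs).tail).dropWhile pvWs).dropWhile pvNp := by
              rw [hscan]
              dsimp only
              rw [← hk1, pv_dropWhile_eq_drop, List.drop_drop]
            by_cases hcr : (((((s.drop (i+1)).dropWhile pvWs).tail).dropWhile pvWs).dropWhile pvNp).head? = some ')'
            · rw [if_pos hcr]
              have hgetk : s[(pvA_scan s (pvA_skip s (pvA_skip s (i+1) + 1))).1]? = some ')' := by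
                rw [← List.head?_drop, hdropk]; exact hcr
              obtain ⟨hklt, hkeq⟩ := List.getElem?_eq_some_iff.mp hgetk
              have hp2 : (pvA_scan s (pvA_skip s (pvA_skip s (i+1) + 1))).2 = false := by
                rw [hscan]
                dsimp only
                rw [decide_eq_false_iff_not]
                intro hcon
                rw [pv_dropWhile_eq_drop, List.drop_drop, List.head?_drop] at hcon
                have hc2 := hcr
                rw [← hk1, pv_dropWhile_eq_drop, List.drop_drop, List.head?_drop] at hc2
                rw [hcon] at hc2
                simp at hc2
              rw [dif_pos hklt, if_pos ⟨hkeq, hp2⟩]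
              have harg : s.drop ((pvA_scan s (pvA_skip s (pvA_skip s (i+1) + 1))).1 + 1)
                  = (((((s.drop (i+1)).dropWhile pvWs).tail).dropWhile pvWs).dropWhile pvNp).tail := by
                rw [← List.tail_drop, hdropk]
              have hslice : PySem.List.slice s (some ((pvA_skip s (pvA_skip s (i+1) + 1) : Nat) : Int))
                    (some (((pvA_scan s (pvA_skip s (pvA_skip s (i+1) + 1))).1 : Nat) : Int))
                  = ((((s.drop (i+1)).dropWhile pvWs).tail).dropWhile pvWs).takeWhile pvNp := by
                rw [hscan]
                dsimp only
                rw [PySem.List.slice_natCast]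
                rw [Nat.add_sub_cancel_left]
                rw [pv_take_takeWhile, hk1]
              rw [ih s _ _ (by omega), harg, hslice]
            · rw [if_neg hcr]
              have hrec : pvA_loop s (i+1) (acc ++ [[s[i]]]) = pvAS (s.drop (i+1)) (acc ++ [[s[i]]]) :=
                ih s (i+1) _ (by omega)
              by_cases hk : (pvA_scan s (pvA_skip s (pvA_skip s (i+1) + 1))).1 < s.length
              · rw [dif_pos hk, if_neg (by
                  intro hpair
                  apply hcr
                  rw [← hdropk, List.head?_drop, List.getElem?_eq_getElem hk, hpair.1])]
                exact hrec
              · rw [dif_neg hk]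
                exact hrec
          · have hcond1 : ¬ ((s.drop (i+1)).dropWhile pvWs).head? = some '*' := by
              rw [← hj1, List.head?_drop, List.getElem?_eq_getElem hj]
              simp only [Option.some.injEq]
              exact hstar
            rw [dif_pos hj, if_neg hstar, if_neg hcond1]
            exact ih s (i+1) _ (by omega)
        · have hcond1 : ¬ ((s.drop (i+1)).dropWhile pvWs).head? = some '*' := by
            rw [← hj1, List.head?_drop, List.getElem?_eq_none (by omega)]
            simp
          rw [dif_neg hj, if_neg hcond1]
          exact ih s (i+1) _ (by omega)
      · rw [if_neg hpar, if_neg hpar]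
        exact ih s (i+1) _ (by omega)
    · rw [pvA_loop]
      rw [dif_neg h, List.drop_eq_nil_of_le (by omega)]
      simp [pvAS]

-- ===== B's find/slice loop equals the structural mirror pvBS =====
theorem pvB_eq : ∀ (nn : Nat) (r : List Char) (out : List (List Char)),
    r.length ≤ nn → pvB_loop r out = pvBS r out := by
  intro nn
  induction nn with
  | zero =>
    intro r out hle
    have hr : r = [] := by cases r with
      | nil => rfl
      | cons a t => simp at hle
    subst hr
    rw [pvB_loop]
    dsimp only
    rw [dif_pos (by
      rw [pv_find_singleton_neg (by simp)])]
    rw [pvBS, dif_neg (by simp)]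
  | succ nn ih =>
    intro r out hle
    by_cases hm : '(' ∈ r
    · have hfind : PySem.Chars.find r ['('] = ((r.takeWhile (fun x => x != '(')).length : Int) :=
        pv_find_singleton hm
    -- abbreviations
      have hTlen : (r.takeWhile (fun x => x != '(')).length < r.length := by
        have h0 : 0 < (r.dropWhile (fun x => x != '(')).length :=
          List.length_pos_iff.mpr (pvBS_mem_ne_nil hm)
        have := List.takeWhile_append_dropWhile (p := fun x => x != '(') (l := r)
        have hlen := congrArg List.length this
        simp only [List.length_append] at hlen
        omega
      rw [pvB_loop]
      dsimp only
      rw [dif_neg (by rw [hfind]; omega)]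
      have hhead : PySem.List.slice r none (some (PySem.Chars.find r ['(']))
          = r.takeWhile (fun x => x != '(') := by
        rw [hfind, PySem.List.slice_to r (by omega)]
        rw [Int.toNat_natCast, pv_take_takeWhile]
      have hrest1 : PySem.List.slice r (some (PySem.Chars.find r ['('] + 1)) none
          = (r.dropWhile (fun x => x != '(')).tail := by
        rw [hfind]
        rw [show ((r.takeWhile (fun x => x != '(')).length : Int) + 1
            = (((r.takeWhile (fun x => x != '(')).length + 1 : Nat) : Int) by push_cast; ring]
        rw [PySem.List.slice_from r (by omega), Int.toNat_natCast]
        rw [pv_dropWhile_eq_drop, List.tail_drop]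
      rw [hhead, hrest1]
      have hlrec : (r.dropWhile (fun x => x != '(')).tail.length ≤ nn := by
        have h0 : 0 < (r.dropWhile (fun x => x != '(')).length :=
          List.length_pos_iff.mpr (pvBS_mem_ne_nil hm)
        have h1 := List.length_dropWhile_le (fun x => x != '(') r
        have h5 : (r.dropWhile (fun x => x != '(')).tail.length
            = (r.dropWhile (fun x => x != '(')).length - 1 := List.length_tail
        omega
      by_cases hrp : ')' ∈ (r.dropWhile (fun x => x != '(')).tail
      · have hqc : PySem.Chars.find ((r.dropWhile (fun x => x != '(')).tail) [')']
            = ((((r.dropWhile (fun x => x != '(')).tail.takeWhile (fun x => x != ')')).length : Nat) : Int) :=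
          pv_find_singleton hrp
        have hqcslice : PySem.List.slice ((r.dropWhile (fun x => x != '(')).tail) none
              (some (PySem.Chars.find ((r.dropWhile (fun x => x != '(')).tail) [')']))
            = (r.dropWhile (fun x => x != '(')).tail.takeWhile (fun x => x != ')') := by
          rw [hqc, PySem.List.slice_to _ (by omega), Int.toNat_natCast, pv_take_takeWhile]
        by_cases hnp : '(' ∉ (r.dropWhile (fun x => x != '(')).tail.takeWhile (fun x => x != ')')
        · have hcnd : PySem.Chars.find ((r.dropWhile (fun x => x != '(')).tail) [')'] ≠ -1 ∧
              PySem.Chars.isIn ['('] (PySem.List.slice ((r.dropWhile (fun x => x != '(')).tail) none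
                (some (PySem.Chars.find ((r.dropWhile (fun x => x != '(')).tail) [')']))) = false := by
            constructor
            · rw [hqc]; omega
            · rw [hqcslice, PySem.Chars.isIn_eq_false_iff, pv_infix_singleton]
              exact hnp
          rw [if_pos hcnd, hqcslice]
          have hlstrip : PySem.Chars.lstrip ((r.dropWhile (fun x => x != '(')).tail.takeWhile (fun x => x != ')'))
              = ((r.dropWhile (fun x => x != '(')).tail.takeWhile (fun x => x != ')')).dropWhile pvWs := rfl
          rw [hlstrip]
          by_cases hst : (((r.dropWhile (fun x => x != '(')).tail.takeWhile (fun x => x != ')')).dropWhile pvWs).head? = some '*'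
          · rw [if_pos (by
              rw [PySem.Chars.startswith, List.isPrefixOf_iff_prefix, pv_prefix_singleton]
              exact hst)]
            have hnext : PySem.List.slice ((r.dropWhile (fun x => x != '(')).tail)
                  (some (PySem.Chars.find ((r.dropWhile (fun x => x != '(')).tail) [')'] + 1)) none
                = ((r.dropWhile (fun x => x != '(')).tail.dropWhile (fun x => x != ')')).tail := by
              rw [hqc]
              rw [show ((((r.dropWhile (fun x => x != '(')).tail.takeWhile (fun x => x != ')')).length : Nat) : Int) + 1
                  = ((((r.dropWhile (fun x => x != '(')).tail.takeWhile (fun x => x != ')')).length + 1 : Nat) : Int) by push_cast; ring]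
              rw [PySem.List.slice_from _ (by omega), Int.toNat_natCast]
              conv_rhs => rw [pv_dropWhile_eq_drop]
              rw [List.tail_drop]
            rw [hnext]
            rw [PySem.List.slice_from_one]
            rw [ih _ _ (by
              have h3 := List.length_dropWhile_le (fun x => x != ')') (r.dropWhile (fun x => x != '(')).tail
              have h4 : ((r.dropWhile (fun x => x != '(')).tail.dropWhile (fun x => x != ')')).tail.length
                  = ((r.dropWhile (fun x => x != '(')).tail.dropWhile (fun x => x != ')')).length - 1 :=
                List.length_tail
              omega)]
            conv_rhs => rw [pvBS]
            rw [dif_pos hm]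
            rw [if_pos ⟨⟨hrp, hnp⟩, hst⟩]
          · rw [if_neg (by
              rw [PySem.Chars.startswith, List.isPrefixOf_iff_prefix, pv_prefix_singleton]
              exact hst)]
            rw [ih _ _ hlrec]
            conv_rhs => rw [pvBS]
            rw [dif_pos hm]
            rw [if_neg (by intro hcon; exact hst hcon.2)]
        · push_neg at hnp
          rw [if_neg (by
            intro hcon
            rcases hcon with ⟨-, hcon2⟩
            rw [hqcslice, PySem.Chars.isIn_eq_false_iff, pv_infix_singleton] at hcon2
            exact hcon2 hnp)]
          rw [ih _ _ hlrec]
          conv_rhs => rw [pvBS]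
          rw [dif_pos hm]
          rw [if_neg (by intro hcon; exact hcon.1.2 hnp)]
      · have hqc : PySem.Chars.find ((r.dropWhile (fun x => x != '(')).tail) [')'] = -1 :=
          pv_find_singleton_neg hrp
        rw [if_neg (by intro hcon; exact hcon.1 hqc)]
        rw [ih _ _ hlrec]
        conv_rhs => rw [pvBS]
        rw [dif_pos hm]
        rw [if_neg (by intro hcon; exact hrp hcon.1.1)]
    · rw [pvB_loop]
      dsimp only
      rw [dif_pos (pv_find_singleton_neg hm)]
      rw [pvBS, dif_neg hm]

-- ===== the per-'(' condition analysis =====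
theorem pvC1 : ∀ (m : List Char),
    ((m.dropWhile pvNp).head? = some ')') ↔
      (')' ∈ m ∧ '(' ∉ m.takeWhile (fun x => x != ')')) := by
  intro m
  induction m with
  | nil => simp
  | cons a t ih =>
    by_cases h1 : a = ')'
    · subst h1
      rw [List.dropWhile_cons_of_neg (by simp [pvNp]), List.takeWhile_cons_of_neg (by simp)]
      simp
    · by_cases h2 : a = '('
      · subst h2
        rw [List.dropWhile_cons_of_neg (by simp [pvNp]), List.takeWhile_cons_of_pos (by simp)]
        simp
      · rw [List.dropWhile_cons_of_pos (by simp [pvNp, h1, h2]),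
            List.takeWhile_cons_of_pos (p := fun x => x != ')') (by simp [h1] : ((a : Char) != ')') = true)]
        rw [ih]
        simp only [List.mem_cons]
        constructor
        · rintro ⟨ha, hb⟩
          exact ⟨Or.inr ha, by simp [Ne.symm h2, hb]⟩
        · rintro ⟨ha, hb⟩
          refine ⟨?_, by simp at hb; exact hb.2⟩
          rcases ha with ha | ha
          · exact absurd ha.symm h1
          · exact ha

theorem pvC2 : ∀ (m : List Char), ((m.dropWhile pvNp).head? = some ')') →
    m.takeWhile (fun x => x != ')') = m.takeWhile pvNp := by
  intro m
  induction m with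
  | nil => simp
  | cons a t ih =>
    intro h
    by_cases h1 : a = ')'
    · subst h1
      rw [List.takeWhile_cons_of_neg (by simp), List.takeWhile_cons_of_neg (by simp [pvNp])]
    · by_cases h2 : a = '('
      · subst h2
        rw [List.dropWhile_cons_of_neg (by simp [pvNp])] at h
        simp at h
      · rw [List.dropWhile_cons_of_pos (by simp [pvNp, h1, h2])] at h
        rw [List.takeWhile_cons_of_pos (p := fun x => x != ')') (by simp [h1] : ((a : Char) != ')') = true),
            List.takeWhile_cons_of_pos (by simp [pvNp, h1, h2]), ih h]

theorem pvC3 : ∀ (m : List Char), ((m.dropWhile pvNp).head? = some ')') →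
    m.dropWhile (fun x => x != ')') = m.dropWhile pvNp := by
  intro m
  induction m with
  | nil => simp
  | cons a t ih =>
    intro h
    by_cases h1 : a = ')'
    · subst h1
      rw [List.dropWhile_cons_of_neg (by simp), List.dropWhile_cons_of_neg (by simp [pvNp])]
    · by_cases h2 : a = '('
      · subst h2
        rw [List.dropWhile_cons_of_neg (by simp [pvNp])] at h
        simp at h
      · rw [List.dropWhile_cons_of_pos (by simp [pvNp, h1, h2])] at h
        rw [List.dropWhile_cons_of_pos (p := fun x => x != ')') (by simp [h1] : ((a : Char) != ')') = true),
            List.dropWhile_cons_of_pos (by simp [pvNp, h1, h2]), ih h]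

theorem pv_ws_star : pvWs '*' = false := by decide
theorem pv_np_ws {c : Char} (h : pvWs c = true) : pvNp c = true := pvWs_np h

theorem pv_core (l : List Char) :
    ((l.dropWhile pvWs).head? = some '*' ∧
      ((((l.dropWhile pvWs).tail).dropWhile pvWs).dropWhile pvNp).head? = some ')')
    ↔ ((')' ∈ l ∧ '(' ∉ l.takeWhile (fun x => x != ')')) ∧
       ((l.takeWhile (fun x => x != ')')).dropWhile pvWs).head? = some '*') := by
  induction l with
  | nil => simp
  | cons a t ih =>
    by_cases hw : pvWs a = true
    · have ha1 : a ≠ ')' := pvWs_ne_rpar hw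
      have ha2 : a ≠ '(' := pvWs_ne_lpar hw
      rw [List.dropWhile_cons_of_pos hw,
          List.takeWhile_cons_of_pos (p := fun x => x != ')') (by simp [ha1] : ((a : Char) != ')') = true),
          List.dropWhile_cons_of_pos hw]
      rw [ih]
      simp only [List.mem_cons]
      constructor
      · rintro ⟨⟨hm, hnp⟩, hh⟩
        exact ⟨⟨Or.inr hm, by simp [Ne.symm ha2, hnp]⟩, hh⟩
      · rintro ⟨⟨hm, hnp⟩, hh⟩
        refine ⟨⟨?_, by simp at hnp; exact hnp.2⟩, hh⟩
        rcases hm with hm | hm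
        · exact absurd hm.symm ha1
        · exact hm
    · rw [List.dropWhile_cons_of_neg (by simp [hw])]
      by_cases hstar : a = '*'
      · subst hstar
        rw [List.takeWhile_cons_of_pos (by simp)]
        rw [List.dropWhile_cons_of_neg (by simp [pv_ws_star])]
        simp only [List.head?_cons, Option.some.injEq, List.tail_cons, List.mem_cons]
        rw [pv_dropWhile_dropWhile (fun _ h => pvWs_np h)]
        rw [pvC1 t]
        simp
      · constructor
        · rintro ⟨hh, -⟩
          exact absurd (by simpa using hh) hstar
        · rintro ⟨⟨hm, hnpp⟩, hh⟩
          exfalso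
          by_cases h1 : a = ')'
          · subst h1
            rw [List.takeWhile_cons_of_neg (by simp)] at hh
            simp at hh
          · by_cases h2 : a = '('
            · apply hnpp
              subst h2
              rw [List.takeWhile_cons_of_pos (by simp)]
              exact List.mem_cons_self
            · rw [List.takeWhile_cons_of_pos (p := fun x => x != ')')
                    (by simp [h1] : ((a : Char) != ')') = true)] at hh
              rw [List.dropWhile_cons_of_neg (by simp [hw])] at hh
              exact hstar (by simpa using hh)

theorem pv_core_eq (l : List Char)
    (h1 : (l.dropWhile pvWs).head? = some '*')
    (h2 : ((((l.dropWhile pvWs).tail).dropWhile pvWs).dropWhile pvNp).head? = some ')') :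
    PySem.Chars.split₀ (((l.takeWhile (fun x => x != ')')).dropWhile pvWs).tail)
      = PySem.Chars.split₀ ((((l.dropWhile pvWs).tail).dropWhile pvWs).takeWhile pvNp)
    ∧ (l.dropWhile (fun x => x != ')')).tail
      = ((((l.dropWhile pvWs).tail).dropWhile pvWs).dropWhile pvNp).tail := by
  induction l with
  | nil => simp at h1
  | cons a t ih =>
    by_cases hw : pvWs a = true
    · have ha1 : a ≠ ')' := pvWs_ne_rpar hw
      rw [List.dropWhile_cons_of_pos hw] at h1 h2
      rw [List.dropWhile_cons_of_pos hw,
          List.takeWhile_cons_of_pos (p := fun x => x != ')') (by simp [ha1] : ((a : Char) != ')') = true),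
          List.dropWhile_cons_of_pos hw,
          List.dropWhile_cons_of_pos (p := fun x => x != ')') (by simp [ha1] : ((a : Char) != ')') = true)]
      exact ih h1 h2
    · rw [List.dropWhile_cons_of_neg (by simp [hw])] at h1 h2
      simp only [List.head?_cons, Option.some.injEq] at h1
      subst h1
      rw [List.tail_cons] at h2
      rw [pv_dropWhile_dropWhile (fun _ h => pvWs_np h)] at h2
      constructor
      · rw [List.takeWhile_cons_of_pos (p := fun x => x != ')') (by decide)]
        rw [List.dropWhile_cons_of_neg (by decide)]
        rw [List.tail_cons]
        rw [pvC2 t h2]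
        rw [List.dropWhile_cons_of_neg (by simpa using hw), List.tail_cons]
        conv_lhs => rw [← List.takeWhile_append_dropWhile (p := pvWs) (l := t)]
        rw [pv_takeWhile_append_all _ (fun b hb => pv_np_ws (List.mem_takeWhile_imp hb))]
        rw [pv_split₀_ws_append _ (fun b hb => List.mem_takeWhile_imp hb)]
      · rw [List.dropWhile_cons_of_pos (p := fun x => x != ')') (by decide)]
        rw [pvC3 t h2]
        rw [List.dropWhile_cons_of_neg (by simpa using hw), List.tail_cons]
        rw [pv_dropWhile_dropWhile (fun _ h => pvWs_np h)]

-- ===== accumulator normalization =====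
theorem pvAS_chain (l : List Char) :
    ((((l.dropWhile pvWs).tail.dropWhile pvWs).dropWhile pvNp).tail).length ≤ l.length := by
  have h1 := List.length_dropWhile_le pvNp ((l.dropWhile pvWs).tail.dropWhile pvWs)
  have h2 := List.length_dropWhile_le pvWs (l.dropWhile pvWs).tail
  have h3 := List.length_dropWhile_le pvWs l
  have h4 : (l.dropWhile pvWs).tail.length = (l.dropWhile pvWs).length - 1 := List.length_tail
  have h5 : ((((l.dropWhile pvWs).tail.dropWhile pvWs).dropWhile pvNp)).tail.length
      = ((((l.dropWhile pvWs).tail.dropWhile pvWs).dropWhile pvNp)).length - 1 := List.length_tail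
  omega

theorem pvBS_chain (l : List Char) :
    ((l.dropWhile (fun x => x != ')')).tail).length ≤ l.length := by
  have h1 := List.length_dropWhile_le (fun x => x != ')') l
  have h2 : (l.dropWhile (fun x => x != ')')).tail.length
      = (l.dropWhile (fun x => x != ')')).length - 1 := List.length_tail
  omega

theorem pvAS_acc : ∀ (nn : Nat) (r : List Char) (acc : List (List Char)), r.length ≤ nn →
    (pvAS r acc).flatten = acc.flatten ++ (pvAS r []).flatten := by
  intro nn
  induction nn with
  | zero =>
    intro r acc hle
    have hr : r = [] := by
      cases r with
      | nil => rfl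
      | cons a t => simp at hle
    subst hr
    simp [pvAS]
  | succ nn ih =>
    intro r acc hle
    cases r with
    | nil => simp [pvAS]
    | cons c l =>
      have hlen : l.length ≤ nn := by simp at hle; omega
      simp only [pvAS]
      split_ifs with hc h1 h2
      · conv_rhs => rw [ih _ _ (le_trans (pvAS_chain l) hlen)]
        conv_lhs => rw [ih _ _ (le_trans (pvAS_chain l) hlen)]
        simp
      · conv_rhs => rw [ih _ _ hlen]
        conv_lhs => rw [ih _ _ hlen]
        simp
      · conv_rhs => rw [ih _ _ hlen]
        conv_lhs => rw [ih _ _ hlen]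
        simp
      · conv_rhs => rw [ih _ _ hlen]
        conv_lhs => rw [ih _ _ hlen]
        simp

theorem pvAS_accN (r : List Char) (acc : List (List Char)) :
    (pvAS r acc).flatten = acc.flatten ++ (pvAS r []).flatten :=
  pvAS_acc r.length r acc le_rfl

theorem pvBS_acc : ∀ (nn : Nat) (r : List Char) (out : List (List Char)), r.length ≤ nn →
    (pvBS r out).flatten = out.flatten ++ (pvBS r []).flatten := by
  intro nn
  induction nn with
  | zero =>
    intro r out hle
    have hr : r = [] := by
      cases r with
      | nil => rfl
      | cons a t => simp at hle
    subst hr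
    rw [pvBS, dif_neg (by simp), pvBS, dif_neg (by simp)]
    simp
  | succ nn ih =>
    intro r out hle
    by_cases hm : '(' ∈ r
    · have h0 : 0 < (r.dropWhile (fun x => x != '(')).length :=
        List.length_pos_iff.mpr (pvBS_mem_ne_nil hm)
      have h1 := List.length_dropWhile_le (fun x => x != '(') r
      have h5 : (r.dropWhile (fun x => x != '(')).tail.length
          = (r.dropWhile (fun x => x != '(')).length - 1 := List.length_tail
      have hltail : (r.dropWhile (fun x => x != '(')).tail.length ≤ nn := by omega
      rw [pvBS, dif_pos hm]
      conv_rhs => rw [pvBS, dif_pos hm]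
      split_ifs with hc
      · conv_rhs => rw [ih _ _ (le_trans (pvBS_chain _) hltail)]
        conv_lhs => rw [ih _ _ (le_trans (pvBS_chain _) hltail)]
        simp
      · conv_rhs => rw [ih _ _ hltail]
        conv_lhs => rw [ih _ _ hltail]
        simp
    · rw [pvBS, dif_neg hm, pvBS, dif_neg hm]
      simp

theorem pvBS_accN (r : List Char) (out : List (List Char)) :
    (pvBS r out).flatten = out.flatten ++ (pvBS r []).flatten :=
  pvBS_acc r.length r out le_rfl

theorem pvBS_noparen {r : List Char} (h : '(' ∉ r) (out : List (List Char)) :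
    pvBS r out = out ++ [r] := by
  rw [pvBS, dif_neg h]

theorem pvBS_shift (c : Char) (l : List Char) (hc : c ≠ '(') :
    (pvBS (c::l) []).flatten = c :: (pvBS l []).flatten := by
  by_cases hm : '(' ∈ l
  · have hm' : '(' ∈ c::l := by simp [hm]
    have hcb : (c != '(') = true := by simp [hc]
    rw [pvBS, dif_pos hm', List.dropWhile_cons_of_pos (p := fun x => x != '(') hcb, List.takeWhile_cons_of_pos (p := fun x => x != '(') hcb]
    conv_rhs => rw [pvBS, dif_pos hm]
    split_ifs with hcond
    · conv_lhs => rw [pvBS_accN]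
      conv_rhs => rw [pvBS_accN]
      simp
    · conv_lhs => rw [pvBS_accN]
      conv_rhs => rw [pvBS_accN]
      simp
  · have hm' : '(' ∉ c::l := by
      intro hmem
      rcases List.mem_cons.mp hmem with h | h
      · exact hc h.symm
      · exact hm h
    rw [pvBS_noparen hm', pvBS_noparen hm]
    simp

-- ===== the bisimulation =====
theorem pv_bisim : ∀ (nn : Nat) (r : List Char), r.length ≤ nn →
    (pvAS r []).flatten = (pvBS r []).flatten := by
  intro nn
  induction nn with
  | zero =>
    intro r hle
    have hr : r = [] := by
      cases r with
      | nil => rfl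
      | cons a t => simp at hle
    subst hr
    rw [pvBS_noparen (by simp)]
    simp [pvAS]
  | succ nn ih =>
    intro r hle
    cases r with
    | nil =>
      rw [pvBS_noparen (by simp)]
      simp [pvAS]
    | cons c l =>
      have hlen : l.length ≤ nn := by simp at hle; omega
      by_cases hc : c = '('
      · subst hc
        simp only [pvAS, if_true]
        rw [pvBS, dif_pos (by simp)]
        rw [List.dropWhile_cons_of_neg (by decide), List.takeWhile_cons_of_neg (by decide),
            List.tail_cons]
        by_cases hca : ((l.dropWhile pvWs).head? = some '*') ∧
            ((((l.dropWhile pvWs).tail).dropWhile pvWs).dropWhile pvNp).head? = some ')'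
        · rw [if_pos hca.1, if_pos hca.2]
          have hcb := (pv_core l).mp hca
          rw [if_pos hcb]
          obtain ⟨hsp, hnx⟩ := pv_core_eq l hca.1 hca.2
          rw [pvAS_accN, pvBS_accN, hnx]
          rw [ih _ (le_trans (pvAS_chain l) hlen)]
          rw [hsp]
          simp
        · rw [if_neg (fun hcb => hca ((pv_core l).mpr hcb))]
          by_cases h1 : (l.dropWhile pvWs).head? = some '*'
          · rw [if_pos h1, if_neg (fun h2 => hca ⟨h1, h2⟩)]
            rw [pvAS_accN, pvBS_accN, ih l hlen]
            simp
          · rw [if_neg h1]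
            rw [pvAS_accN, pvBS_accN, ih l hlen]
            simp
      · rw [pvBS_shift c l hc]
        simp only [pvAS, if_neg hc]
        rw [pvAS_accN, ih l hlen]
        simp

-- ===== VERDICT (by name: the statement is the Claim_ definition above) =====
theorem handle_prefix_mult_py_spec : Claim_equal_handle_prefix_mult_py := by
  unfold Claim_equal_handle_prefix_mult_py
  intro expr _
  unfold Spec_handle_prefix_mult_py handle_prefix_mult_py handle_prefix_mult_py_alt
  rw [pvA_eq expr.toList.length expr.toList 0 [] (by omega), List.drop_zero]
  rw [pvB_eq expr.toList.length expr.toList [] le_rfl]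
  rw [show ("".toList : List Char) = [] from rfl]
  rw [pv_join_nil_flatten, pv_join_nil_flatten]
  exact congrArg String.ofList (pv_bisim expr.toList.length expr.toList le_rfl)
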